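-- pv_equiv track=rewrite | github.com/mattdoug604/Rosalind | 2_bioinformatics_stronghold/rosalind_ITWV.py | find_disjoint_motifs
-- ===== SOURCE A (Python) =====
-- from itertools import combinations_with_replacement as comb_r
--
-- def is_superstring(a, b, superstr):
--     # Check if two strings can be interwoven into a superstring.
--     if len(superstr) == 0:
--         return True
--     elif a[0] == b[0] == superstr[0]:
--         return is_superstring(a[1:], b, superstr[1:]) or is_superstring(a, b[1:], superstr[1:])
--     elif a[0] == superstr[0]:
--         return is_superstring(a[1:], b, superstr[1:])
--     elif b[0] == superstr[0]:
--         return is_superstring(a, b[1:], superstr[1:])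
--     else:
--         return False
--
-- def find_disjoint_motifs(s, patterns):
--     # Initialize the matrix that will hold 1 at position i, j if pattern[i] and
--     # pattern[j] can be interwoven into a superstring in s, or 0 if they can't.
--     matrix = [[0 for j in range(len(patterns))] for i in range(len(patterns))]
--
--     # For each unique combination of patterns...
--     for i in list(comb_r((i for i in range(len(patterns))), 2)):
--         a = patterns[i[0]]
--         b = patterns[i[1]]
--
--         for j in range(len(s) - len(a) - len(b) + 1):
--             superstr = s[j : j + len(a) + len(b)]
--
--             # Add a character outside the alphabet to avoid out of range errors.
--             if is_superstring(a + "$", b + "$", superstr):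
--
--                 # If, for example, patterns 3 and 1 can form a superstring,
--                 # patterns 1 and 3 can as well.
--                 matrix[i[0]][i[1]] = 1
--                 matrix[i[1]][i[0]] = 1
--                 break
--
--     return matrix
-- ===== SOURCE B (Python) =====
-- # B: rolling-array DP interweaving check instead of A's branching recursion (alternative algorithm, same return value).
-- def interweaves(a, b, t):
--     # dp[j] == True iff a[i:] and b[j:] interweave exactly into t[i+j:],
--     # rolled over i from len(a) down to 0 (polynomial DP, no branching recursion).
--     la, lb = len(a), len(b)
--     dp = [True] * (lb + 1)
--     for j in range(lb - 1, -1, -1):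
--         dp[j] = dp[j + 1] and b[j] == t[la + j]
--     for i in range(la - 1, -1, -1):
--         dp[lb] = dp[lb] and a[i] == t[i + lb]
--         for j in range(lb - 1, -1, -1):
--             dp[j] = (a[i] == t[i + j] and dp[j]) or (b[j] == t[i + j] and dp[j + 1])
--     return dp[0]
--
-- def find_disjoint_motifs(s, patterns):
--     n = len(patterns)
--     matrix = [[0] * n for _ in range(n)]
--     for i in range(n):
--         for j in range(i, n):
--             a, b = patterns[i], patterns[j]
--             w = len(a) + len(b)
--             if any(interweaves(a, b, s[k:k + w]) for k in range(len(s) - w + 1)):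
--                 matrix[i][j] = matrix[j][i] = 1
--     return matrix
-- ===== Notes on version B (the rewrite author's own statement) =====
-- stated objective: alternative
-- what changed: Replaces A's branching recursion per window (worst-case exponential) with a rolling-array dynamic program over (position in a, position in b) and the break-scan with any(); Pre_ excludes inputs where s contains '$' and a window could be scanned, since A's sentinel character then collides with the text so that is_superstring raises IndexError on some inputs and reports spurious interweavings on others.
-- outside the precondition, e.g. on find_disjoint_motifs('A$', ['A', 'B']): A returns [[1, 1], [1, 0]], B returns [[0, 0], [0, 0]]; on find_disjoint_motifs('$z', ['', 'xy']): A raises IndexError, B returns [[1, 0], [0, 0]]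
import Mathlib
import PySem

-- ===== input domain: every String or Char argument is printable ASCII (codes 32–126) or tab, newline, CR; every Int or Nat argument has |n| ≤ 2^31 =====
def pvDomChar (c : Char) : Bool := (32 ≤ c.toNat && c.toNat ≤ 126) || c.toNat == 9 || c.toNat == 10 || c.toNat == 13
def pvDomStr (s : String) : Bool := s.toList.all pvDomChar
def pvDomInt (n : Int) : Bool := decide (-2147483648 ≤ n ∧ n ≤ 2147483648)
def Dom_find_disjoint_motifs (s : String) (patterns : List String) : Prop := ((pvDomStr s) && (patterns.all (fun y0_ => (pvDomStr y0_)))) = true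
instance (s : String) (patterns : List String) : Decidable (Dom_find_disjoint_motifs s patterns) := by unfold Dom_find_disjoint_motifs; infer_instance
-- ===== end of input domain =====

-- B replaces A's branching interweaving recursion (exponential in the worst case) by a
-- rolling-array DP over positions in the two motifs (objective: alternative; not measured faster).
-- Equivalence is claimed under Pre_ below (no '$' sentinel collision possible).

-- ===== PORT A =====

-- matrix[i][j] = v  (i, j always in range in both programs)
def pvSet2d (m : List (List Int)) (i j : Nat) (v : Int) : List (List Int) :=
  m.modify i (fun row => row.set j v)

-- is_superstring(a, b, superstr); none = IndexError (a[0]/b[0] on an empty string)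
def isSuper : List Char → List Char → List Char → Option Bool
  | _, _, [] => some true
  | [], _, _ :: _ => none
  | _ :: _, [], _ :: _ => none
  | x :: as, y :: bs, c :: ts =>
    if x = y ∧ y = c then
      match isSuper as (y :: bs) ts with
      | none => none
      | some true => some true
      | some false => isSuper (x :: as) bs ts
    else if x = c then isSuper as (y :: bs) ts
    else if y = c then isSuper (x :: as) bs ts
    else some false
  termination_by a b t => t.length
  decreasing_by all_goals simp

-- the inner 'for j in range(...): if is_superstring(...): set; break' loop
def pvLoopW (ap bp : List Char) (sl : List Char) (w : Int) (ks : List Int)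
    (m : List (List Int)) (i j : Nat) : List (List Int) :=
  match ks with
  | [] => m
  | k :: rest =>
    if isSuper ap bp (PySem.List.slice sl (some k) (some (k + w))) = some true then
      pvSet2d (pvSet2d m i j 1) j i 1
    else pvLoopW ap bp sl w rest m i j

def find_disjoint_motifs (s : String) (patterns : List String) : List (List Int) :=
  let n := patterns.length
  let matrix : List (List Int) := (List.range n).map (fun _ => (List.range n).map (fun _ => (0 : Int)))
  -- list(comb_r(range(n), 2)) = [(i, j) for i in range(n) for j in range(i, n)]
  let pairs : List (Nat × Nat) := (List.range n).flatMap (fun i => ((List.range n).drop i).map (fun j => (i, j)))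
  pairs.foldl (fun m ij =>
    let a := (patterns.getD ij.1 "").toList
    let b := (patterns.getD ij.2 "").toList
    pvLoopW (a ++ ['$']) (b ++ ['$']) s.toList ((a.length : Int) + (b.length : Int))
      (PySem.List.pyRange 0 ((s.toList.length : Int) - (a.length : Int) - (b.length : Int) + 1) 1)
      m ij.1 ij.2) matrix

-- ===== PORT B =====

-- first loop of interweaves: dp[j] = dp[j+1] and b[j] == t[la+j], j descending;
-- called with ts = t.drop la; builds the row back-to-front
def iwInitRow : List Char → List Char → List Bool
  | [], _ => [true]
  | y :: bs, ts =>
    let r := iwInitRow bs ts.tail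
    (r.headD false && (y == ts.headD ' ')) :: r

-- one iteration of the outer loop: dp[lb] = dp[lb] and a[i]==t[i+lb];
-- then dp[j] = (a[i]==t[i+j] and dp[j]) or (b[j]==t[i+j] and dp[j+1]), j descending;
-- called with ts = t.drop i, old = previous row
def iwStepRow (x : Char) : List Char → List Char → List Bool → List Bool
  | [], ts, old => [old.headD false && (x == ts.headD ' ')]
  | y :: bs, ts, old =>
    let r := iwStepRow x bs ts.tail old.tail
    let c := ts.headD ' '
    (((x == c) && old.headD false) || ((y == c) && r.headD false)) :: r

-- the outer 'for i in range(la-1, -1, -1)' loop, i = la - |as|; ts = t.drop i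
def iwTable : List Char → List Char → List Char → List Bool
  | [], bs, ts => iwInitRow bs ts
  | x :: as, bs, ts => iwStepRow x bs ts (iwTable as bs ts.tail)

def interweavesL (a b t : List Char) : Bool := (iwTable a b t).headD false

def find_disjoint_motifs_alt (s : String) (patterns : List String) : List (List Int) :=
  let n := patterns.length
  let sl := s.toList
  let m0 : List (List Int) := (List.range n).map (fun _ => List.replicate n (0 : Int))
  (List.range n).foldl (fun m i =>
    ((List.range n).drop i).foldl (fun m j =>
      let a := (patterns.getD i "").toList
      let b := (patterns.getD j "").toList
      let w : Int := (a.length : Int) + (b.length : Int)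
      if (PySem.List.pyRange 0 ((sl.length : Int) - w + 1) 1).any
           (fun k => interweavesL a b (PySem.List.slice sl (some k) (some (k + w)))) then
        pvSet2d (pvSet2d m i j 1) j i 1
      else m) m) m0

-- ===== PRECONDITION & SPEC =====

-- Pre_ excludes inputs where s contains '$' and at least one window could be scanned: A's
-- sentinel character then collides with the text, making is_superstring raise IndexError on some
-- inputs and report spurious interweavings on others. (If every pattern satisfies len(s) < 2*len(p),
-- no window is ever scanned and the sentinel is harmless, so those inputs stay inside Pre_.)
def Pre_find_disjoint_motifs (s : String) (patterns : List String) : Prop :=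
  '$' ∉ s.toList ∨ ∀ p ∈ patterns, s.toList.length < 2 * p.toList.length
instance (s : String) (patterns : List String) : Decidable (Pre_find_disjoint_motifs s patterns) := by
  unfold Pre_find_disjoint_motifs; infer_instance

def pvWitness_find_disjoint_motifs : String × List String := ("ACAGT", ["CA", "AGT", "T"])

def Spec_find_disjoint_motifs (s : String) (patterns : List String) (out : List (List Int)) : Prop := out = find_disjoint_motifs_alt s patterns
instance (s : String) (patterns : List String) (out : List (List Int)) : Decidable (Spec_find_disjoint_motifs s patterns out) := by unfold Spec_find_disjoint_motifs; infer_instance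

-- ===== CLAIM (what is proved, stated in full; the proofs are below) =====
def Claim_equal_find_disjoint_motifs : Prop := ∀ (s : String) (patterns : List String), Dom_find_disjoint_motifs s patterns → Pre_find_disjoint_motifs s patterns → Spec_find_disjoint_motifs s patterns (find_disjoint_motifs s patterns)

-- ===== LEMMAS AND PROOFS =====

-- reference interweaving predicate (suffix recursion)
def IW : List Char → List Char → List Char → Bool
  | [], [], [] => true
  | [], [], _ :: _ => false
  | [], _ :: _, [] => false
  | _ :: _, _, [] => false
  | [], y :: bs, c :: ts => (y == c) && IW [] bs ts
  | x :: as, [], c :: ts => (x == c) && IW as [] ts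
  | x :: as, y :: bs, c :: ts => ((x == c) && IW as (y :: bs) ts) || ((y == c) && IW (x :: as) bs ts)
  termination_by a b t => t.length
  decreasing_by all_goals simp

-- A's sentinel recursion computes IW when '$' does not occur in the superstring
theorem isSuper_eq_IW : ∀ (ts as bs : List Char), '$' ∉ ts →
    ts.length = as.length + bs.length →
    isSuper (as ++ ['$']) (bs ++ ['$']) ts = some (IW as bs ts) := by
  intro ts
  induction ts with
  | nil =>
    intro as bs _ hlen
    cases as with
    | cons _ _ => simp only [List.length_cons, List.length_nil] at hlen; omega
    | nil =>
      cases bs with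
      | cons _ _ => simp only [List.length_cons, List.length_nil] at hlen; omega
      | nil => simp [isSuper, IW]
  | cons c ts ih =>
    intro as bs hmem hlen
    have hc : c ≠ '$' := fun h => hmem (h ▸ List.mem_cons_self)
    have hts : '$' ∉ ts := fun h => hmem (List.mem_cons_of_mem _ h)
    match as, bs with
    | [], [] => simp at hlen
    | [], y :: bs =>
      have hlen' : ts.length = ([] : List Char).length + bs.length := by
        simp only [List.length_cons, List.length_nil] at hlen ⊢; omega
      have h1 : ¬('$' = y ∧ y = c) := fun h => hc (h.1.trans h.2).symm
      have h2 : ¬(('$' : Char) = c) := fun h => hc h.symm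
      simp only [List.nil_append, List.cons_append, isSuper]
      rw [if_neg h1, if_neg h2]
      by_cases hyc : y = c
      · have hrec := ih [] bs hts hlen'
        rw [List.nil_append] at hrec
        rw [if_pos hyc, hrec]
        simp [IW, hyc]
      · rw [if_neg hyc]
        simp [IW, hyc]
    | x :: as, [] =>
      have hlen' : ts.length = as.length + ([] : List Char).length := by
        simp only [List.length_cons, List.length_nil] at hlen ⊢; omega
      have h1 : ¬(x = '$' ∧ ('$' : Char) = c) := fun h => hc h.2.symm
      simp only [List.nil_append, List.cons_append, isSuper]
      rw [if_neg h1]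
      by_cases hxc : x = c
      · have hrec := ih as [] hts hlen'
        rw [List.nil_append] at hrec
        rw [if_pos hxc, hrec]
        simp [IW, hxc]
      · rw [if_neg hxc, if_neg (fun h => hc h.symm : ¬(('$' : Char) = c))]
        simp [IW, hxc]
    | x :: as, y :: bs =>
      have hlen1 : ts.length = as.length + (y :: bs).length := by
        simp only [List.length_cons] at hlen ⊢; omega
      have hlen2 : ts.length = (x :: as).length + bs.length := by
        simp only [List.length_cons] at hlen ⊢; omega
      simp only [List.cons_append, isSuper]
      have hrec1 := ih as (y :: bs) hts hlen1
      have hrec2 := ih (x :: as) bs hts hlen2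
      simp only [List.cons_append] at hrec1 hrec2
      by_cases h1 : x = y ∧ y = c
      · rw [if_pos h1, hrec1]
        obtain ⟨hxy, hyc⟩ := h1
        subst hxy
        subst hyc
        cases hIW : IW as (x :: bs) ts with
        | true => simp [IW, hIW]
        | false =>
          rw [hrec2]
          simp [IW, hIW]
      · rw [if_neg h1]
        by_cases h2 : x = c
        · have hyc : ¬ y = c := fun h => h1 ⟨h2.trans h.symm, h⟩
          rw [if_pos h2, hrec1]
          simp [IW, h2, hyc]
        · rw [if_neg h2]
          by_cases h3 : y = c
          · rw [if_pos h3, hrec2]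
            simp [IW, h2, h3]
          · rw [if_neg h3]
            simp [IW, h2, h3]

def rowSpec (as : List Char) : List Char → List Char → List Bool
  | [], ts => [IW as [] ts]
  | y :: bs, ts => IW as (y :: bs) ts :: rowSpec as bs ts.tail

theorem rowSpec_headD (as bs ts : List Char) : (rowSpec as bs ts).head?.getD false = IW as bs ts := by
  cases bs <;> simp [rowSpec]

theorem iwInitRow_eq (bs : List Char) : ∀ ts : List Char, ts.length = bs.length →
    iwInitRow bs ts = rowSpec [] bs ts := by
  induction bs with
  | nil =>
    intro ts h
    match ts, h with
    | [], _ => simp [iwInitRow, rowSpec, IW]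
  | cons y bs ih =>
    intro ts h
    match ts, h with
    | c :: ts', h =>
      simp only [List.length_cons, Nat.add_right_cancel_iff] at h
      simp [iwInitRow, rowSpec, ih ts' h, rowSpec_headD, IW, Bool.and_comm]

theorem iwStepRow_eq (x : Char) (bs : List Char) : ∀ (as ts : List Char),
    ts.length = as.length + 1 + bs.length →
    iwStepRow x bs ts (rowSpec as bs ts.tail) = rowSpec (x :: as) bs ts := by
  induction bs with
  | nil =>
    intro as ts h
    match ts, h with
    | c :: ts', h =>
      simp [iwStepRow, rowSpec, IW, Bool.and_comm]
  | cons y bs ih =>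
    intro as ts h
    match ts, h with
    | c :: ts', h =>
      simp only [List.length_cons] at h
      have h' : ts'.length = as.length + 1 + bs.length := by omega
      have := ih as ts' h'
      simp only [iwStepRow, rowSpec, List.tail_cons] at *
      rw [this]
      simp [rowSpec_headD, IW]

theorem iwTable_eq (as : List Char) : ∀ (bs ts : List Char),
    ts.length = as.length + bs.length →
    iwTable as bs ts = rowSpec as bs ts := by
  induction as with
  | nil => intro bs ts h; simpa [iwTable] using iwInitRow_eq bs ts (by simpa using h)
  | cons x as ih =>
    intro bs ts h
    have h1 : ts.tail.length = as.length + bs.length := by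
      simp only [List.length_tail]; simp only [List.length_cons] at h; omega
    simp only [iwTable, ih bs ts.tail h1]
    exact iwStepRow_eq x bs as ts (by simp only [List.length_cons] at h; omega)

theorem interweavesL_eq_IW (a b t : List Char) (h : t.length = a.length + b.length) :
    interweavesL a b t = IW a b t := by
  unfold interweavesL
  rw [iwTable_eq a b t h]
  cases b <;> simp [rowSpec]

-- per-window agreement
theorem window_eq (sl a b : List Char) (hs : '$' ∉ sl) (k : Int)
    (hk0 : 0 ≤ k) (hk : k + (a.length + b.length : Int) ≤ sl.length) :
    (isSuper (a ++ ['$']) (b ++ ['$'])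
        (PySem.List.slice sl (some k) (some (k + ((a.length : Int) + (b.length : Int))))) = some true)
    = (interweavesL a b
        (PySem.List.slice sl (some k) (some (k + ((a.length : Int) + (b.length : Int))))) = true) := by
  have hlen : (PySem.List.slice sl (some k)
      (some (k + ((a.length : Int) + (b.length : Int))))).length = a.length + b.length := by
    rw [PySem.List.slice_toNat sl hk0 (by omega)]
    simp only [List.length_take, List.length_drop]
    omega
  have hmem : '$' ∉ PySem.List.slice sl (some k)
      (some (k + ((a.length : Int) + (b.length : Int)))) :=
    fun h => hs (PySem.List.mem_of_mem_slice sl _ _ h)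
  rw [isSuper_eq_IW _ a b hmem hlen, interweavesL_eq_IW a b _ hlen]
  cases IW a b (PySem.List.slice sl (some k) (some (k + ((a.length : Int) + (b.length : Int))))) <;> simp

-- a break-scan is 'any' (given pointwise agreement of the conditions on the scanned list)
theorem pvLoopW_any (a b sl : List Char) (w : Int) (m : List (List Int)) (i j : Nat) :
    ∀ ks : List Int,
      (∀ k ∈ ks, (isSuper (a ++ ['$']) (b ++ ['$']) (PySem.List.slice sl (some k) (some (k + w))) = some true)
        = (interweavesL a b (PySem.List.slice sl (some k) (some (k + w))) = true)) →
      pvLoopW (a ++ ['$']) (b ++ ['$']) sl w ks m i j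
      = if ks.any (fun k => interweavesL a b (PySem.List.slice sl (some k) (some (k + w)))) then
          pvSet2d (pvSet2d m i j 1) j i 1
        else m := by
  intro ks
  induction ks with
  | nil => intro _; simp [pvLoopW]
  | cons k rest ih =>
    intro h
    have hk := h k (List.mem_cons_self)
    have hrest := ih (fun k' hk' => h k' (List.mem_cons_of_mem _ hk'))
    rw [pvLoopW, hrest]
    by_cases hc : interweavesL a b (PySem.List.slice sl (some k) (some (k + w))) = true
    · rw [if_pos (hk ▸ hc)]
      simp [hc]
    · rw [if_neg (fun hh => hc (hk ▸ hh))]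
      simp [hc]

-- the break-loop is 'any'
theorem pvLoopW_eq (a b sl : List Char) (hs : '$' ∉ sl) (m : List (List Int)) (i j : Nat) :
    pvLoopW (a ++ ['$']) (b ++ ['$']) sl ((a.length : Int) + (b.length : Int))
        (PySem.List.pyRange 0 ((sl.length : Int) - (a.length : Int) - (b.length : Int) + 1) 1) m i j
    = if (PySem.List.pyRange 0 ((sl.length : Int) - ((a.length : Int) + (b.length : Int)) + 1) 1).any
          (fun k => interweavesL a b (PySem.List.slice sl (some k) (some (k + ((a.length : Int) + (b.length : Int)))))) then
        pvSet2d (pvSet2d m i j 1) j i 1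
      else m := by
  have hbound : (sl.length : Int) - (a.length : Int) - (b.length : Int) + 1
      = (sl.length : Int) - ((a.length : Int) + (b.length : Int)) + 1 := by ring
  rw [hbound]
  apply pvLoopW_any
  intro k hkmem
  have := (PySem.List.mem_pyRange_one).mp hkmem
  exact window_eq sl a b hs k this.1 (by omega)

-- ===== VERDICT (by name: the statement is the Claim_ definition above) =====
-- per-pair body equality: either '$' is absent from s, or no window is scanned at all
theorem body_eq (sl a b : List Char)
    (h : '$' ∉ sl ∨ (sl.length < 2 * a.length ∧ sl.length < 2 * b.length))
    (m : List (List Int)) (i j : Nat) :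
    pvLoopW (a ++ ['$']) (b ++ ['$']) sl ((a.length : Int) + (b.length : Int))
        (PySem.List.pyRange 0 ((sl.length : Int) - (a.length : Int) - (b.length : Int) + 1) 1) m i j
    = if (PySem.List.pyRange 0 ((sl.length : Int) - ((a.length : Int) + (b.length : Int)) + 1) 1).any
          (fun k => interweavesL a b (PySem.List.slice sl (some k) (some (k + ((a.length : Int) + (b.length : Int)))))) then
        pvSet2d (pvSet2d m i j 1) j i 1
      else m := by
  rcases h with hs | ⟨ha, hb⟩
  · exact pvLoopW_eq a b sl hs m i j
  · rw [PySem.List.pyRange_one_eq_nil (by omega), PySem.List.pyRange_one_eq_nil (by omega)]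
    simp [pvLoopW]

theorem find_disjoint_motifs_spec : Claim_equal_find_disjoint_motifs := by
  intro s patterns _ hpre
  unfold Pre_find_disjoint_motifs at hpre
  unfold Spec_find_disjoint_motifs find_disjoint_motifs find_disjoint_motifs_alt
  simp only [List.foldl_flatMap, List.foldl_map, List.map_const', List.length_range]
  apply PySem.List.foldl_congr_mem
  intro m i hi
  apply PySem.List.foldl_congr_mem
  intro m' j hj
  have hi' : i < patterns.length := List.mem_range.mp hi
  have hj' : j < patterns.length := List.mem_range.mp (List.mem_of_mem_drop hj)
  apply body_eq
  rcases hpre with hs | hall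
  · exact Or.inl hs
  · refine Or.inr ⟨?_, ?_⟩
    · exact hall _ (by rw [List.getD_eq_getElem _ _ hi']; exact List.getElem_mem hi')
    · exact hall _ (by rw [List.getD_eq_getElem _ _ hj']; exact List.getElem_mem hj')
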